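-- pv_equiv track=rewrite | github.com/semantic-systems/discie | src/cie_utils/utils.py | separate_texts
-- ===== SOURCE A (Python) =====
-- def separate_texts(texts, spans):
--     separated_texts = []
--     is_mention_list = []
--     for text, text_spans in zip(texts, spans):
--         separated_text = []
--         prev_end = 0
--         is_mention = []
--         for span_start, span_end in text_spans:
--             if text[prev_end:span_start]:
--                 separated_text.append(text[prev_end:span_start])
--                 is_mention.append(False)
--             separated_text.append(text[span_start:span_end])
--             is_mention.append(True)
--             prev_end = span_end
--         if text[prev_end:]:
--             separated_text.append(text[prev_end:])
--             is_mention.append(False)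
--         is_mention_list.append(is_mention)
--         separated_texts.append(separated_text)
--     return separated_texts, is_mention_list
-- ===== SOURCE B (Python) =====
-- def separate_texts(texts, spans):
--     separated_texts = []
--     is_mention_list = []
--     for text, text_spans in zip(texts, spans):
--         # phase 1: index intervals with mention flag (gaps always recorded)
--         intervals = []
--         prev_end = 0
--         for span_start, span_end in text_spans:
--             intervals.append((prev_end, span_start, False))
--             intervals.append((span_start, span_end, True))
--             prev_end = span_end
--         intervals.append((prev_end, len(text), False))
--         # phase 2: slice, dropping empty non-mention segments, then unzip
--         pairs = [(text[a:b], f) for (a, b, f) in intervals if f or text[a:b]]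
--         separated_texts.append([seg for seg, _ in pairs])
--         is_mention_list.append([f for _, f in pairs])
--     return separated_texts, is_mention_list
-- ===== Notes on version B (the rewrite author's own statement) =====
-- stated objective: alternative
-- what changed: Two-phase decomposition per text: first build a flat list of (start, stop, is_mention) index intervals (recording every gap, even empty ones), then in a single comprehension slice and filter out empty non-mention segments and unzip, instead of A's interleaved slice-test-append loop with conditional branches.
import Mathlib
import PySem

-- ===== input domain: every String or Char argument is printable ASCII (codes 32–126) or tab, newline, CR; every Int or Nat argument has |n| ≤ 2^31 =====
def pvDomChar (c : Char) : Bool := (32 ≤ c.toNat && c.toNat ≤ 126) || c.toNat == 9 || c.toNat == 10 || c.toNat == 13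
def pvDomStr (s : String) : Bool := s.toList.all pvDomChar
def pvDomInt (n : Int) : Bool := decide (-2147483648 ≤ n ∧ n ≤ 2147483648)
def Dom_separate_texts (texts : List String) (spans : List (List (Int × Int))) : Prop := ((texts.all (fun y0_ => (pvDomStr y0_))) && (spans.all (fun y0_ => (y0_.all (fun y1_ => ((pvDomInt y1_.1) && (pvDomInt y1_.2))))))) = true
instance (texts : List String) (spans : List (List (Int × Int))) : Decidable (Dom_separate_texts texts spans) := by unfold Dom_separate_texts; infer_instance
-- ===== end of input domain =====

-- B splits each text's work into two phases: build (start, stop, is_mention) index intervals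
-- (recording every gap), then slice + filter empty non-mention segments + unzip — an
-- alternative decomposition of A's interleaved slice-test-append loop, same cost.


-- ===== PORT A =====
-- inner loop body: one span (span_start, span_end) processed against state (separated_text, prev_end, is_mention)
def sepA_step (text : String) (st : List String × Int × List Bool) (sp : Int × Int) :
    List String × Int × List Bool :=
  let gap := PySem.Str.slice text (some st.2.1) (some sp.1)
  let sep := if gap ≠ "" then st.1 ++ [gap] else st.1
  let ism := if gap ≠ "" then st.2.2 ++ [false] else st.2.2
  (sep ++ [PySem.Str.slice text (some sp.1) (some sp.2)], sp.2, ism ++ [true])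

-- one text: the span loop, then the trailing text[prev_end:] segment
def sepA_text (text : String) (sps : List (Int × Int)) : List String × List Bool :=
  let st := sps.foldl (sepA_step text) ([], 0, [])
  let tail := PySem.Str.slice text (some st.2.1) none
  if tail ≠ "" then (st.1 ++ [tail], st.2.2 ++ [false]) else (st.1, st.2.2)

def separate_texts (texts : List String) (spans : List (List (Int × Int))) :
    List (List String) × List (List Bool) :=
  (texts.zip spans).foldl
    (fun acc p =>
      let r := sepA_text p.1 p.2
      (acc.1 ++ [r.1], acc.2 ++ [r.2]))
    ([], [])

-- ===== PORT B =====
-- one text, phase 1: index intervals (start, stop, is_mention); phase 2: slice, filter, unzip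
def sepB_text (text : String) (sps : List (Int × Int)) : List String × List Bool :=
  let iv := sps.foldl
    (fun (st : List (Int × Int × Bool) × Int) sp =>
      (st.1 ++ [(st.2, sp.1, false), (sp.1, sp.2, true)], sp.2))
    ([], 0)
  let intervals := iv.1 ++ [(iv.2, PySem.Str.len text, false)]
  let pairs := (intervals.filter
      (fun t => t.2.2 || decide (PySem.Str.slice text (some t.1) (some t.2.1) ≠ ""))).map
      (fun t => (PySem.Str.slice text (some t.1) (some t.2.1), t.2.2))
  (pairs.map Prod.fst, pairs.map Prod.snd)

def separate_texts_alt (texts : List String) (spans : List (List (Int × Int))) :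
    List (List String) × List (List Bool) :=
  (texts.zip spans).foldl
    (fun acc p =>
      let r := sepB_text p.1 p.2
      (acc.1 ++ [r.1], acc.2 ++ [r.2]))
    ([], [])

-- ===== PRECONDITION & SPEC =====
def Spec_separate_texts (texts : List String) (spans : List (List (Int × Int))) (out : List (List String) × List (List Bool)) : Prop := out = separate_texts_alt texts spans
instance (texts : List String) (spans : List (List (Int × Int))) (out : List (List String) × List (List Bool)) : Decidable (Spec_separate_texts texts spans out) := by unfold Spec_separate_texts; infer_instance

-- ===== CLAIM (what is proved, stated in full; the proofs are below) =====
def Claim_equal_separate_texts : Prop := ∀ (texts : List String) (spans : List (List (Int × Int))), Dom_separate_texts texts spans → Spec_separate_texts texts spans (separate_texts texts spans)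

-- ===== LEMMAS AND PROOFS =====

-- spec-side shape of B's interval list, as a pure recursion
def gIv (prev : Int) : List (Int × Int) → List (Int × Int × Bool)
  | [] => []
  | (s, e) :: r => (prev, s, false) :: (s, e, true) :: gIv e r

-- final prev_end after the span loop
def pend (prev : Int) : List (Int × Int) → Int
  | [] => prev
  | (_, e) :: r => pend e r

lemma ivFold (sps : List (Int × Int)) :
    ∀ (acc : List (Int × Int × Bool)) (prev : Int),
      sps.foldl
        (fun (st : List (Int × Int × Bool) × Int) sp =>
          (st.1 ++ [(st.2, sp.1, false), (sp.1, sp.2, true)], sp.2)) (acc, prev)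
      = (acc ++ gIv prev sps, pend prev sps) := by
  induction sps with
  | nil => intro acc prev; simp [gIv, pend]
  | cons sp r ih =>
    intro acc prev
    obtain ⟨s, e⟩ := sp
    simp only [List.foldl_cons, ih, gIv, pend]
    simp

-- a slice up to the full length equals the open-ended slice
lemma slice_len_list {α : Type} (xs : List α) (a : Int) :
    PySem.List.slice xs (some a) (some (xs.length : Int)) = PySem.List.slice xs (some a) none := by
  unfold PySem.List.slice
  simp [PySem.List.clampIdx]
  split_ifs <;> omega

lemma slice_len (text : String) (a : Int) :
    PySem.Str.slice text (some a) (some ((text.toList.length : Int))) = PySem.Str.slice text (some a) none := by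
  simp only [PySem.Str.slice]
  simp only [PySem.Chars.slice]
  rw [slice_len_list]

-- the same fact with the length written through String.length (the form simp normalizes to)
lemma slice_len' (text : String) (a : Int) :
    PySem.Str.slice text (some a) (some ((text.length : Int))) = PySem.Str.slice text (some a) none := by
  rw [show ((text.length : Int)) = ((text.toList.length : Int)) by simp]
  exact slice_len text a

-- B's filtered/mapped pairs
def bPairs (text : String) (l : List (Int × Int × Bool)) : List (String × Bool) :=
  (l.filter (fun t => t.2.2 || decide (PySem.Str.slice text (some t.1) (some t.2.1) ≠ ""))).map
    (fun t => (PySem.Str.slice text (some t.1) (some t.2.1), t.2.2))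

-- main inner-loop invariant: A's loop + trailing step = B's interval pairs
lemma loop_eq (text : String) (sps : List (Int × Int)) :
    ∀ (prev : Int) (sep : List String) (ism : List Bool),
      (let st := sps.foldl (sepA_step text) (sep, prev, ism)
       let tail := PySem.Str.slice text (some st.2.1) none
       if tail ≠ "" then (st.1 ++ [tail], st.2.2 ++ [false]) else (st.1, st.2.2))
      = (sep ++ (bPairs text (gIv prev sps ++ [(pend prev sps, PySem.Str.len text, false)])).map Prod.fst,
         ism ++ (bPairs text (gIv prev sps ++ [(pend prev sps, PySem.Str.len text, false)])).map Prod.snd) := by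
  induction sps with
  | nil =>
    intro prev sep ism
    simp only [List.foldl_nil, gIv, pend, List.nil_append, bPairs, List.filter, PySem.Str.len]
    rw [slice_len]
    by_cases h : PySem.Str.slice text (some prev) none = "" <;> simp [h, slice_len']
  | cons sp r ih =>
    intro prev sep ism
    obtain ⟨s, e⟩ := sp
    simp only [List.foldl_cons, gIv, List.cons_append]
    rw [show sepA_step text (sep, prev, ism) (s, e)
        = (let gap := PySem.Str.slice text (some prev) (some s)
           ((if gap ≠ "" then sep ++ [gap] else sep) ++ [PySem.Str.slice text (some s) (some e)], e,
            (if gap ≠ "" then ism ++ [false] else ism) ++ [true])) from rfl]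
    by_cases h : PySem.Str.slice text (some prev) (some s) = ""
    · simp only [h, ne_eq, not_true_eq_false, if_false]
      rw [ih]
      simp [bPairs, List.filter, h, pend]
    · simp only [ne_eq, h, not_false_eq_true, if_true]
      rw [ih]
      simp [bPairs, List.filter, h, pend]

lemma text_eq (text : String) (sps : List (Int × Int)) :
    sepA_text text sps = sepB_text text sps := by
  unfold sepA_text sepB_text
  rw [ivFold]
  simpa [bPairs] using loop_eq text sps 0 [] []

-- ===== VERDICT (by name: the statement is the Claim_ definition above) =====
theorem separate_texts_spec : Claim_equal_separate_texts := by
  intro texts spans _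
  unfold Spec_separate_texts separate_texts separate_texts_alt
  simp only [text_eq]
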